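-- pv_equiv track=rewrite | github.com/alicialeb/transformation_of_ui_logs_into_oc_event_data | functions.py | categorize_other_ui_obj
-- ===== SOURCE A (Python) =====
-- def categorize_other_ui_obj(other_ui_obj_cols, object_hierarchy):
--     """
--     Categorizes the ui object types found in the log and saves them in separate dictionaries.
--
--     :param other_ui_obj_cols: A dictionary with column indices as keys and object types as values.
--     :param object_hierarchy: A dictionary specifying the typical ui object hierarchy.
--     :return: A tuple of the dictionaries including the column indices and object types per hierarchy level.
--     """
--     # dictionaries to save other ui object types and their column indices according to their hierarchy level
--     other_ui_obj_cols_highest = {}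
--     other_ui_obj_cols_second = {}
--     other_ui_obj_cols_third = {}
--     other_ui_obj_cols_fourth = {}
--
--     # dictionary to store columns that haven't been assigned one clear object type, but a list of possible ones
--     undecided_obj_cols = {}
--
--     # split other_ui_obj_cols dictionary into separate dictionaries according to their hierarchy level
--     for index, obj_types in other_ui_obj_cols.items():
--         if len(obj_types) == 1:
--             obj_type = obj_types[0]
--             for level, value in object_hierarchy.items():
--                 if obj_type in value:
--                     if level == 'obj_highest_level':
--                         other_ui_obj_cols_highest.setdefault(index, obj_type)
--                     elif level == 'obj_second_level':
--                         other_ui_obj_cols_second.setdefault(index, obj_type)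
--                     elif level == 'obj_third_level':
--                         other_ui_obj_cols_third.setdefault(index, obj_type)
--                     else:
--                         other_ui_obj_cols_fourth.setdefault(index, obj_type)
--         else:
--             undecided_obj_cols[index] = obj_types
--
--     return other_ui_obj_cols_highest, other_ui_obj_cols_second, other_ui_obj_cols_third, other_ui_obj_cols_fourth, undecided_obj_cols
-- ===== SOURCE B (Python) =====
-- def categorize_other_ui_obj(other_ui_obj_cols, object_hierarchy):
--     """Staged re-implementation: instead of one loop threading five dictionaries,
--     build each hierarchy-level dictionary in its own independent pass, deciding
--     membership with a single any() over the hierarchy, and collect the undecided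
--     columns with a comprehension."""
--
--     def slot_of(level):
--         if level == 'obj_highest_level':
--             return 0
--         if level == 'obj_second_level':
--             return 1
--         if level == 'obj_third_level':
--             return 2
--         return 3
--
--     def bucket(slot):
--         d = {}
--         for index, obj_types in other_ui_obj_cols.items():
--             if len(obj_types) == 1:
--                 obj_type = obj_types[0]
--                 if any(slot_of(level) == slot and obj_type in value
--                        for level, value in object_hierarchy.items()):
--                     d.setdefault(index, obj_type)
--         return d
--
--     undecided = {index: obj_types
--                  for index, obj_types in other_ui_obj_cols.items()
--                  if len(obj_types) != 1}
--
--     return bucket(0), bucket(1), bucket(2), bucket(3), undecided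
-- ===== Notes on version B (the rewrite author's own statement) =====
-- stated objective: alternative
-- what changed: B replaces A's single loop that threads five dictionaries through a nested hierarchy rescan by four independent per-level passes, each deciding membership with one any() over the hierarchy, plus a comprehension for the undecided columns.
import Mathlib
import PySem

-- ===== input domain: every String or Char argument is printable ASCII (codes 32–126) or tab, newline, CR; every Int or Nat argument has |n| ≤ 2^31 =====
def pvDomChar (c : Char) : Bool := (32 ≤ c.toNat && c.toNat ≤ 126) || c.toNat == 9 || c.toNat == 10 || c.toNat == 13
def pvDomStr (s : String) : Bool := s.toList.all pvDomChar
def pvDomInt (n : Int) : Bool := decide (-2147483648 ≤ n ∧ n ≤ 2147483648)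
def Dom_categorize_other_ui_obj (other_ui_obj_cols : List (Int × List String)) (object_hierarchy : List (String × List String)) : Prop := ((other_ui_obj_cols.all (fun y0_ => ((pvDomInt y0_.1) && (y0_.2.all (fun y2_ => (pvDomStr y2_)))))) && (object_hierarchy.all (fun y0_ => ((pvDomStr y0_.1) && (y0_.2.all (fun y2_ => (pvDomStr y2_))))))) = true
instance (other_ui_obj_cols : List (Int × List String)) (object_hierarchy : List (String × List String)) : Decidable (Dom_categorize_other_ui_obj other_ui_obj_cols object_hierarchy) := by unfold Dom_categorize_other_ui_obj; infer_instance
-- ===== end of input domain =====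

-- B replaces A's single loop threading five dictionaries through a nested hierarchy rescan
-- by four independent per-level passes plus a comprehension (objective: alternative decomposition).

-- four level dictionaries (highest, second, third, fourth), and the full five-component state of A
abbrev PvQ4 : Type := PySem.Dict Int String × PySem.Dict Int String × PySem.Dict Int String × PySem.Dict Int String
abbrev PvQ5 : Type := PySem.Dict Int String × PySem.Dict Int String × PySem.Dict Int String × PySem.Dict Int String × PySem.Dict Int (List String)

-- ===== PORT A =====
-- A's inner loop body: one hierarchy entry lv, membership test then the level-name if-chain
def pvLevelStep (index : Int) (obj_type : String) (acc : PvQ4) (lv : String × List String) : PvQ4 :=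
  if lv.2.contains obj_type then
    if lv.1 == "obj_highest_level" then (acc.1.setdefault index obj_type, acc.2.1, acc.2.2.1, acc.2.2.2)
    else if lv.1 == "obj_second_level" then (acc.1, acc.2.1.setdefault index obj_type, acc.2.2.1, acc.2.2.2)
    else if lv.1 == "obj_third_level" then (acc.1, acc.2.1, acc.2.2.1.setdefault index obj_type, acc.2.2.2)
    else (acc.1, acc.2.1, acc.2.2.1, acc.2.2.2.setdefault index obj_type)
  else acc

-- A's outer loop body: one column (index, obj_types)
def pvColStepA (object_hierarchy : List (String × List String)) (acc : PvQ5) (p : Int × List String) : PvQ5 :=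
  if p.2.length == 1 then
    let t := p.2.headD ""   -- obj_types[0]; exact because the guard gives length = 1
    let r := object_hierarchy.foldl (pvLevelStep p.1 t) (acc.1, acc.2.1, acc.2.2.1, acc.2.2.2.1)
    (r.1, r.2.1, r.2.2.1, r.2.2.2, acc.2.2.2.2)
  else (acc.1, acc.2.1, acc.2.2.1, acc.2.2.2.1, acc.2.2.2.2.insert p.1 p.2)

def categorize_other_ui_obj (other_ui_obj_cols : List (Int × List String)) (object_hierarchy : List (String × List String)) : (List (Int × String)) × (List (Int × String)) × (List (Int × String)) × (List (Int × String)) × (List (Int × List String)) :=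
  let fin := other_ui_obj_cols.foldl (pvColStepA object_hierarchy)
    (PySem.Dict.empty, PySem.Dict.empty, PySem.Dict.empty, PySem.Dict.empty, PySem.Dict.empty)
  (fin.1.items, fin.2.1.items, fin.2.2.1.items, fin.2.2.2.1.items, fin.2.2.2.2.items)

-- ===== PORT B =====
-- Source B's slot_of: maps a level name to the bucket number it feeds (default 3 = fourth)
def pvSlotOf (level : String) : Int :=
  if level == "obj_highest_level" then 0
  else if level == "obj_second_level" then 1
  else if level == "obj_third_level" then 2
  else 3

-- Source B's bucket(slot): one independent pass over the columns for a single level dictionary;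
-- the any() generator over object_hierarchy decides membership for this slot
def pvBucketStep (object_hierarchy : List (String × List String)) (slot : Int)
    (d : PySem.Dict Int String) (p : Int × List String) : PySem.Dict Int String :=
  if p.2.length == 1 then
    let obj_type := p.2.headD ""   -- obj_types[0]; exact because the guard gives length = 1
    if object_hierarchy.any (fun lv => pvSlotOf lv.1 == slot && lv.2.contains obj_type) then
      d.setdefault p.1 obj_type
    else d
  else d

def pvBucket (other_ui_obj_cols : List (Int × List String)) (object_hierarchy : List (String × List String)) (slot : Int) : PySem.Dict Int String :=
  other_ui_obj_cols.foldl (pvBucketStep object_hierarchy slot) PySem.Dict.empty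

-- Source B's dict comprehension for the undecided columns
def pvUndStep (d : PySem.Dict Int (List String)) (p : Int × List String) : PySem.Dict Int (List String) :=
  if p.2.length != 1 then d.insert p.1 p.2 else d

def pvUndecided (other_ui_obj_cols : List (Int × List String)) : PySem.Dict Int (List String) :=
  other_ui_obj_cols.foldl pvUndStep PySem.Dict.empty

def categorize_other_ui_obj_alt (other_ui_obj_cols : List (Int × List String)) (object_hierarchy : List (String × List String)) : (List (Int × String)) × (List (Int × String)) × (List (Int × String)) × (List (Int × String)) × (List (Int × List String)) :=
  ((pvBucket other_ui_obj_cols object_hierarchy 0).items,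
   (pvBucket other_ui_obj_cols object_hierarchy 1).items,
   (pvBucket other_ui_obj_cols object_hierarchy 2).items,
   (pvBucket other_ui_obj_cols object_hierarchy 3).items,
   (pvUndecided other_ui_obj_cols).items)

-- ===== PRECONDITION & SPEC =====
def Spec_categorize_other_ui_obj (other_ui_obj_cols : List (Int × List String)) (object_hierarchy : List (String × List String)) (out : (List (Int × String)) × (List (Int × String)) × (List (Int × String)) × (List (Int × String)) × (List (Int × List String))) : Prop := out = categorize_other_ui_obj_alt other_ui_obj_cols object_hierarchy
instance (other_ui_obj_cols : List (Int × List String)) (object_hierarchy : List (String × List String)) (out : (List (Int × String)) × (List (Int × String)) × (List (Int × String)) × (List (Int × String)) × (List (Int × List String))) : Decidable (Spec_categorize_other_ui_obj other_ui_obj_cols object_hierarchy out) := by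
  unfold Spec_categorize_other_ui_obj
  letI d3 : DecidableEq (List (Int × String) × List (Int × List String)) := inferInstance
  letI d2 : DecidableEq (List (Int × String) × List (Int × String) × List (Int × List String)) := instDecidableEqProd
  letI d1 : DecidableEq (List (Int × String) × List (Int × String) × List (Int × String) × List (Int × List String)) := instDecidableEqProd
  exact instDecidableEqProd _ _

-- ===== CLAIM (what is proved, stated in full; the proofs are below) =====
def Claim_equal_categorize_other_ui_obj : Prop := ∀ (other_ui_obj_cols : List (Int × List String)) (object_hierarchy : List (String × List String)), Dom_categorize_other_ui_obj other_ui_obj_cols object_hierarchy → Spec_categorize_other_ui_obj other_ui_obj_cols object_hierarchy (categorize_other_ui_obj other_ui_obj_cols object_hierarchy)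

-- ===== LEMMAS AND PROOFS =====

-- a second setdefault with the same key is a no-op
theorem pv_setdefault_idem (d : PySem.Dict Int String) (k : Int) (v : String) :
    (d.setdefault k v).setdefault k v = d.setdefault k v := by
  apply PySem.Dict.setdefault_of_contains
  simp [PySem.Dict.contains_setdefault]

-- the conditional setdefault B performs for one slot
def pvSel (object_hierarchy : List (String × List String)) (t : String) (s : Int) (i : Int)
    (d : PySem.Dict Int String) : PySem.Dict Int String :=
  if object_hierarchy.any (fun lv => pvSlotOf lv.1 == s && lv.2.contains t) then d.setdefault i t else d

-- A's level-name if-chain routes exactly to the slot pvSlotOf picks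
theorem pvLevelStep_eq (i : Int) (t : String) (a : PvQ4) (lv : String × List String) :
    pvLevelStep i t a lv
      = (if pvSlotOf lv.1 == 0 && lv.2.contains t then a.1.setdefault i t else a.1,
         if pvSlotOf lv.1 == 1 && lv.2.contains t then a.2.1.setdefault i t else a.2.1,
         if pvSlotOf lv.1 == 2 && lv.2.contains t then a.2.2.1.setdefault i t else a.2.2.1,
         if pvSlotOf lv.1 == 3 && lv.2.contains t then a.2.2.2.setdefault i t else a.2.2.2) := by
  unfold pvLevelStep pvSlotOf
  by_cases hc : lv.2.contains t = true
  · have hm : t ∈ lv.2 := by simpa using hc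
    by_cases h1 : (lv.1 == "obj_highest_level") = true
    · simp [hm, h1]
    · by_cases h2 : (lv.1 == "obj_second_level") = true
      · simp [hm, h1, h2]
      · by_cases h3 : (lv.1 == "obj_third_level") = true
        · simp [hm, h1, h2, h3]
        · simp [hm, h1, h2, h3]
  · have hm : t ∉ lv.2 := by simpa using hc
    simp [hm]

-- A's hierarchy rescan for one column equals four independent conditional setdefaults
theorem pvInnerA_eq (i : Int) (t : String) (h : List (String × List String)) :
    ∀ a : PvQ4,
      h.foldl (pvLevelStep i t) a
        = (pvSel h t 0 i a.1, pvSel h t 1 i a.2.1, pvSel h t 2 i a.2.2.1, pvSel h t 3 i a.2.2.2) := by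
  induction h with
  | nil => intro a; simp [pvSel]
  | cons lv rest ih =>
    intro a
    have hany : ∀ (s : Int) (d : PySem.Dict Int String),
        pvSel (lv :: rest) t s i d =
          if (pvSlotOf lv.1 == s && lv.2.contains t) then pvSel rest t s i (d.setdefault i t)
          else pvSel rest t s i d := by
      intro s d
      unfold pvSel
      simp only [List.any_cons]
      by_cases hp : (pvSlotOf lv.1 == s && lv.2.contains t) = true
      · simp only [hp, Bool.true_or]
        split_ifs <;> first | rfl | exact (pv_setdefault_idem d i t).symm
      · simp only [Bool.not_eq_true] at hp
        simp only [hp, Bool.false_or]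
        simp
    simp only [List.foldl_cons]
    rw [ih, pvLevelStep_eq, hany 0, hany 1, hany 2, hany 3]
    split_ifs <;> rfl

-- A's column step splits into B's four bucket steps plus the undecided step
theorem pvColStepA_eq (h : List (String × List String)) (q : PvQ5) (p : Int × List String) :
    pvColStepA h q p
      = (pvBucketStep h 0 q.1 p, pvBucketStep h 1 q.2.1 p, pvBucketStep h 2 q.2.2.1 p,
         pvBucketStep h 3 q.2.2.2.1 p, pvUndStep q.2.2.2.2 p) := by
  unfold pvColStepA pvBucketStep pvUndStep
  by_cases hl : (p.2.length == 1) = true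
  · have hl' : p.2.length = 1 := by simpa using hl
    simp only [hl, if_true]
    rw [pvInnerA_eq]
    simp [pvSel, hl']
  · have hl' : ¬ p.2.length = 1 := by simpa using hl
    simp [hl, hl']

-- the whole of A's loop, from an arbitrary five-dict state, splits into B's five passes
theorem pvFoldA_eq (h : List (String × List String)) (cols : List (Int × List String)) :
    ∀ q : PvQ5,
      cols.foldl (pvColStepA h) q
        = (cols.foldl (pvBucketStep h 0) q.1,
           cols.foldl (pvBucketStep h 1) q.2.1,
           cols.foldl (pvBucketStep h 2) q.2.2.1,
           cols.foldl (pvBucketStep h 3) q.2.2.2.1,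
           cols.foldl pvUndStep q.2.2.2.2) := by
  induction cols with
  | nil => intro q; rfl
  | cons p rest ih =>
    intro q
    simp only [List.foldl_cons]
    rw [ih, pvColStepA_eq]

-- ===== VERDICT (by name: the statement is the Claim_ definition above) =====
theorem categorize_other_ui_obj_spec : Claim_equal_categorize_other_ui_obj := by
  intro cols h _
  unfold Spec_categorize_other_ui_obj categorize_other_ui_obj categorize_other_ui_obj_alt pvBucket pvUndecided
  rw [pvFoldA_eq]
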